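-- pv_equiv track=rewrite | github.com/KendyOuti/exercises-python | 4_strings/ex06.py | inverter_case
-- ===== SOURCE A (Python) =====
-- def inverter_case(frase):
--     if (len(frase) == 0):
--         return ""
--     else:
--         letra = frase[0]
--         if letra.isalpha():
--             letra = letra.swapcase()
--         elif letra == " ":
--             letra = "-"
--         else:
--             pass
--
--         return letra + inverter_case(frase[1:])
-- ===== SOURCE B (Python) =====
-- def inverter_case(frase):
--     return frase.swapcase().replace(" ", "-")
-- ===== Notes on version B (the rewrite author's own statement) =====
-- stated objective: idiomatic
-- what changed: Replaced the per-character recursion and branch chain with a single closed-form expression using str.swapcase() and str.replace(), removing recursion entirely.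
import Mathlib
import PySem

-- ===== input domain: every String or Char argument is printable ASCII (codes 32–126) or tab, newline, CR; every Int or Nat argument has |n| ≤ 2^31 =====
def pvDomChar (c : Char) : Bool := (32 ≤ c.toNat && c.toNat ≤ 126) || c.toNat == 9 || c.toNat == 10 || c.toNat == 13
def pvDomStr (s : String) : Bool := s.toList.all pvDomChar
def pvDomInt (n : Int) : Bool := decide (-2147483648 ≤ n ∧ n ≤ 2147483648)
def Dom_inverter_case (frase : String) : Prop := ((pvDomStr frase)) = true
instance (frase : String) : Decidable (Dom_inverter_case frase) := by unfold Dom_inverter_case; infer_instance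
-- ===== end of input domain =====

-- B replaces A's per-character recursion/branching with one whole-string swapcase pass plus a space→dash replace (idiomatic, non-recursive).


-- ===== PORT A =====
-- str.swapcase() on one character (exact on the ASCII domain: upper→lower, lower→upper, else unchanged)
def pySwapChar (c : Char) : Char :=
  if PySem.Chars.isupper c then PySem.Chars.lowerChar c
  else if PySem.Chars.islower c then PySem.Chars.upperChar c
  else c

-- A's recursion, transliterated on the code-point list (frase[0] / frase[1:] = head / tail)
def inverterCaseGo : List Char → List Char
  | [] => []
  | letra :: rest =>
      (if PySem.Chars.isalpha letra then pySwapChar letra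
       else if letra = ' ' then '-'
       else letra) :: inverterCaseGo rest

def inverter_case (frase : String) : String := String.ofList (inverterCaseGo frase.toList)

-- ===== PORT B =====
-- Source B: return frase.swapcase().replace(" ", "-")   (swapcase ported per code point, exact on the ASCII domain)
def inverter_case_alt (frase : String) : String :=
  PySem.Str.replace (String.ofList (frase.toList.map pySwapChar)) " " "-"

-- ===== PRECONDITION & SPEC =====
def Spec_inverter_case (frase : String) (out : String) : Prop := out = inverter_case_alt frase
instance (frase : String) (out : String) : Decidable (Spec_inverter_case frase out) := by unfold Spec_inverter_case; infer_instance

-- ===== CLAIM (what is proved, stated in full; the proofs are below) =====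
def Claim_equal_inverter_case : Prop := ∀ (frase : String), Dom_inverter_case frase → Spec_inverter_case frase (inverter_case frase)

-- ===== LEMMAS AND PROOFS =====

-- replace with a single-char pattern is a per-character map
theorem replace_go_single (a b : Char) (fuel : Nat) (l acc : List Char) (h : l.length ≤ fuel) :
    PySem.Chars.replace.go [a] [b] fuel l acc
      = acc.reverse ++ l.map (fun c => if c = a then b else c) := by
  induction fuel generalizing l acc with
  | zero =>
    cases l with
    | nil => simp [PySem.Chars.replace.go]
    | cons c t => simp at h
  | succ n ih =>
    cases l with
    | nil => simp [PySem.Chars.replace.go]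
    | cons c t =>
      simp only [List.length_cons, Nat.succ_le_succ_iff] at h
      by_cases hc : c = a
      · subst hc
        rw [show PySem.Chars.replace.go [c] [b] (n+1) (c :: t) acc
              = PySem.Chars.replace.go [c] [b] n t ([b].reverse ++ acc) from by
            simp [PySem.Chars.replace.go, List.isPrefixOf]]
        rw [ih t _ h]; simp
      · rw [show PySem.Chars.replace.go [a] [b] (n+1) (c :: t) acc
              = PySem.Chars.replace.go [a] [b] n t (c :: acc) from by
            simp only [PySem.Chars.replace.go, List.isPrefixOf, Bool.and_true]
            rw [if_neg]
            simp only [beq_iff_eq]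
            exact fun hh => hc hh.symm]
        rw [ih t _ h]; simp [hc]

theorem replace_single (a b : Char) (l : List Char) :
    PySem.Chars.replace l [a] [b] = l.map (fun c => if c = a then b else c) := by
  rw [show PySem.Chars.replace l [a] [b] = PySem.Chars.replace.go [a] [b] l.length l [] from by
        simp [PySem.Chars.replace]]
  simpa using replace_go_single a b l.length l [] le_rfl

-- swapping the case of a letter never yields a space
theorem swapChar_ne_space (c : Char) (h : PySem.Chars.isalpha c = true) : pySwapChar c ≠ ' ' := by
  have hs : (' ').toNat = 32 := rfl
  unfold pySwapChar
  unfold PySem.Chars.isalpha at h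
  simp only [PySem.Chars.isupper, PySem.Chars.islower, Bool.or_eq_true, Bool.and_eq_true,
    decide_eq_true_eq] at h
  rcases h with ⟨h1, h2⟩ | ⟨h1, h2⟩
  · have b1 : 65 ≤ c.toNat := h1
    have b2 : c.toNat ≤ 90 := h2
    rw [if_pos (by simp [PySem.Chars.isupper, h1, h2])]
    simp only [PySem.Chars.lowerChar, PySem.Chars.isupper, h1, h2, decide_true, Bool.and_self,
      if_true]
    intro hcon
    have ht := congrArg Char.toNat hcon
    rw [hs] at ht
    simp only [Char.toNat_ofNat, Nat.isValidChar] at ht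
    split_ifs at ht <;> omega
  · have b1 : 97 ≤ c.toNat := h1
    have b2 : c.toNat ≤ 122 := h2
    have hnu : ¬ (PySem.Chars.isupper c) = true := by
      simp only [PySem.Chars.isupper, Bool.and_eq_true, decide_eq_true_eq]
      rintro ⟨_, hb⟩
      have : c.toNat ≤ 90 := hb
      omega
    rw [if_neg hnu, if_pos (by simp [PySem.Chars.islower, h1, h2])]
    simp only [PySem.Chars.upperChar, PySem.Chars.islower, h1, h2, decide_true, Bool.and_self,
      if_true]
    intro hcon
    have ht := congrArg Char.toNat hcon
    rw [hs] at ht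
    simp only [Char.toNat_ofNat, Nat.isValidChar] at ht
    split_ifs at ht <;> omega

theorem per_char (c : Char) :
    (if pySwapChar c = ' ' then '-' else pySwapChar c)
      = (if PySem.Chars.isalpha c then pySwapChar c
         else if c = ' ' then '-' else c) := by
  by_cases ha : PySem.Chars.isalpha c = true
  · rw [if_neg (swapChar_ne_space c ha)]
    simp [ha]
  · have hsw : pySwapChar c = c := by
      unfold PySem.Chars.isalpha at ha
      simp only [Bool.or_eq_true, not_or, Bool.not_eq_true] at ha
      simp [pySwapChar, ha.1, ha.2]
    rw [hsw]
    simp [ha]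

theorem go_eq (l : List Char) :
    (l.map pySwapChar).map (fun c => if c = ' ' then '-' else c) = inverterCaseGo l := by
  induction l with
  | nil => rfl
  | cons c t ih =>
    simp only [List.map_cons, inverterCaseGo, ih, List.cons.injEq, and_true]
    exact per_char c

-- ===== VERDICT (by name: the statement is the Claim_ definition above) =====
theorem inverter_case_spec : Claim_equal_inverter_case := by
  intro frase _
  unfold Spec_inverter_case inverter_case inverter_case_alt
  simp only [PySem.Str.replace, String.toList_ofList]
  rw [show (" " : String).toList = [' '] from rfl, show ("-" : String).toList = ['-'] from rfl,
    replace_single, go_eq]
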